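-- pv_equiv track=rewrite | github.com/andycavatorta/nervebox_2 | common/nerveOSC.py | parse
-- ===== SOURCE A (Python) =====
-- def parse(nerveOSC_str):
-- 	nerveOSC_l = nerveOSC_str.split(" ")
-- 	path = None
-- 	host = None
-- 	innerpath = ""
-- 	value = None
-- 	time = None
-- 	env = None
-- 	for token in nerveOSC_l:
-- 		if token[0] == "/":
-- 			path = token
-- 		if token[0] == "@":
-- 			time = token
-- 		if token[0] == "{":
-- 			env = token
-- 	path_l = path.split("/")
-- 	value  = path_l[-1:][0]
-- 	# replace w/ join or other string function
-- 	innerpath = "/"+"/".join(path_l[1:-1])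
-- 	path = "/"+"/".join(path_l[1:])
-- 	return {
-- 		"host":path_l[1],
-- 		"path":path,
-- 		"innerpath":innerpath,
-- 		"value":value,
-- 		"time":time,
-- 		"env":env
-- 	}
-- ===== SOURCE B (Python) =====
-- def parse(nerveOSC_str):
--     tokens = nerveOSC_str.split(" ")
--     path = next((t for t in reversed(tokens) if t[0] == "/"), None)
--     time = next((t for t in reversed(tokens) if t[0] == "@"), None)
--     env = next((t for t in reversed(tokens) if t[0] == "{"), None)
--     host, *segs = path[1:].split("/")
--     return {
--         "host": host,
--         "path": "/" + "/".join([host] + segs),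
--         "innerpath": ("/" + "/".join([host] + segs[:-1])) if segs else "/",
--         "value": segs[-1] if segs else host,
--         "time": time,
--         "env": env,
--     }
-- ===== Notes on version B (the rewrite author's own statement) =====
-- stated objective: idiomatic
-- what changed: A's forward loop that keeps overwriting three slots becomes three first-match searches over the reversed token list (next(... reversed ...)), and the path tail is split after stripping its leading slash with head/tail unpacking and conditional expressions, instead of A's split with an empty head plus [1], [-1:][0] and [1:-1] slicing.
import Mathlib
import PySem

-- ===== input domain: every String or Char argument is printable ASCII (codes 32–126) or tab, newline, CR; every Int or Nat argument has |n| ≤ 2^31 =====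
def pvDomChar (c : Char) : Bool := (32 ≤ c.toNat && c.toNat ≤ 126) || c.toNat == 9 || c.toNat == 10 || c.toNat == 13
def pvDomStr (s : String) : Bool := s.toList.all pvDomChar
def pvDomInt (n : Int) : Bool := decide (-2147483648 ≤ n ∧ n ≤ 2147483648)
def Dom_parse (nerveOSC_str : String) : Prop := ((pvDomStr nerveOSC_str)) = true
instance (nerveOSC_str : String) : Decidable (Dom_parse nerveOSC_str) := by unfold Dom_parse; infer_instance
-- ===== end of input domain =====

-- B replaces A's forward three-slot loop by three reversed first-match searches and splits
-- path after stripping its leading slash, avoiding the empty-head bookkeeping (objective: idiomatic).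
-- Equivalence is about the RETURN value; neither version mutates its argument.

-- ===== PORT A =====
-- the body of A's 'for token in nerveOSC_l' loop (three independent ifs over (path, time, env))
def parseStep (st : Option String × Option String × Option String) (token : String) :
    Option String × Option String × Option String :=
  let st := if PySem.Str.pyGet? token 0 = some '/' then (some token, st.2.1, st.2.2) else st
  let st := if PySem.Str.pyGet? token 0 = some '@' then (st.1, some token, st.2.2) else st
  if PySem.Str.pyGet? token 0 = some '{' then (st.1, st.2.1, some token) else st

def parse (nerveOSC_str : String) : List (String × Option String) :=
  let nerveOSC_l := (PySem.Str.split? nerveOSC_str " ").getD []   -- sep " " ≠ "": always some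
  match nerveOSC_l.foldl parseStep (none, none, none) with
  | (none, _, _) => []    -- Python: AttributeError on path.split (path is None) — excluded by Pre_
  | (some path, time, env) =>
    let path_l := (PySem.Str.split? path "/").getD []             -- sep "/" ≠ "": always some
    let value := (PySem.List.pyGet? (PySem.List.slice path_l (some (-1)) none) 0).getD ""  -- path_l ≠ [], so [-1:][0] in range
    let innerpath := "/" ++ PySem.Str.join "/" (PySem.List.slice path_l (some 1) (some (-1)))
    let path2 := "/" ++ PySem.Str.join "/" (PySem.List.slice path_l (some 1) none)
    [("host", some ((PySem.List.pyGet? path_l 1).getD "")),       -- in range: path starts with '/' under Pre_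
     ("path", some path2),
     ("innerpath", some innerpath),
     ("value", some value),
     ("time", time),
     ("env", env)]

-- ===== PORT B =====
-- next((t for t in reversed(tokens) if t[0] == c), None)
def pvFindRev (tokens : List String) (c : Char) : Option String :=
  List.find? (fun t => decide (PySem.Str.pyGet? t 0 = some c)) tokens.reverse

def parse_alt (nerveOSC_str : String) : List (String × Option String) :=
  let tokens := (PySem.Str.split? nerveOSC_str " ").getD []       -- sep " " ≠ "": always some
  let time := pvFindRev tokens '@'
  let env := pvFindRev tokens '{'
  match pvFindRev tokens '/' with
  | none => []    -- Python: TypeError on path[1:] (path is None) — excluded by Pre_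
  | some path =>
    match (PySem.Str.split? (PySem.Str.slice path (some 1) none) "/").getD [] with
    | [] => []    -- unreachable: str.split never returns an empty list
    | host :: segs =>
      [("host", some host),
       ("path", some ("/" ++ PySem.Str.join "/" (host :: segs))),
       ("innerpath", some (if segs.isEmpty then "/"
                           else "/" ++ PySem.Str.join "/" (host :: PySem.List.slice segs none (some (-1))))),
       ("value", some (if segs.isEmpty then host else (PySem.List.pyGet? segs (-1)).getD "")),  -- segs ≠ []: [-1] in range
       ("time", time),
       ("env", env)]

-- ===== PRECONDITION & SPEC =====
-- Pre_ is exactly A's return domain: an empty token makes token[0] raise IndexError, and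
-- without a slash-initial token path stays None and path.split raises AttributeError.
def Pre_parse (nerveOSC_str : String) : Prop :=
  (∀ t ∈ (PySem.Str.split? nerveOSC_str " ").getD [], t ≠ "") ∧
  (∃ t ∈ (PySem.Str.split? nerveOSC_str " ").getD [], PySem.Str.pyGet? t 0 = some '/')
instance (nerveOSC_str : String) : Decidable (Pre_parse nerveOSC_str) := by unfold Pre_parse; infer_instance

def pvWitness_parse : String := "/a/b @12 {x}"

def Spec_parse (nerveOSC_str : String) (out : List (String × Option String)) : Prop := out = parse_alt nerveOSC_str
instance (nerveOSC_str : String) (out : List (String × Option String)) : Decidable (Spec_parse nerveOSC_str out) := by unfold Spec_parse; infer_instance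

-- ===== CLAIM (what is proved, stated in full; the proofs are below) =====
def Claim_equal_parse : Prop := ∀ (nerveOSC_str : String), Dom_parse nerveOSC_str → Pre_parse nerveOSC_str → Spec_parse nerveOSC_str (parse nerveOSC_str)

-- ===== LEMMAS AND PROOFS =====

-- A's fold over the three slots computes, in each slot, the last matching token = first match in reverse.
theorem foldl_parseStep (toks : List String) : ∀ (a b c : Option String),
    toks.foldl parseStep (a, b, c) =
      ((List.find? (fun t => decide (PySem.Str.pyGet? t 0 = some '/')) toks.reverse).or a,
       (List.find? (fun t => decide (PySem.Str.pyGet? t 0 = some '@')) toks.reverse).or b,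
       (List.find? (fun t => decide (PySem.Str.pyGet? t 0 = some '{')) toks.reverse).or c) := by
  induction toks with
  | nil => intro a b c; simp
  | cons t ts ih =>
    intro a b c
    have hstep : parseStep (a, b, c) t =
        (if PySem.Str.pyGet? t 0 = some '/' then some t else a,
         if PySem.Str.pyGet? t 0 = some '@' then some t else b,
         if PySem.Str.pyGet? t 0 = some '{' then some t else c) := by
      by_cases h1 : PySem.Str.pyGet? t 0 = some '/' <;>
      by_cases h2 : PySem.Str.pyGet? t 0 = some '@' <;>
      by_cases h3 : PySem.Str.pyGet? t 0 = some '{' <;>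
      simp_all [parseStep]
    rw [List.foldl_cons, hstep, ih]
    simp only [List.reverse_cons, List.find?_append]
    by_cases h1 : PySem.Str.pyGet? t 0 = some '/' <;>
    by_cases h2 : PySem.Str.pyGet? t 0 = some '@' <;>
    by_cases h3 : PySem.Str.pyGet? t 0 = some '{' <;>
    simp_all [List.find?]

-- splitOn.go's accumulator is a reversed prefix of the result
theorem splitOn_go_acc (sep : List Char) (fuel : Nat) : ∀ (l cur : List Char) (acc : List (List Char)),
    PySem.Chars.splitOn.go sep fuel l cur acc = acc.reverse ++ PySem.Chars.splitOn.go sep fuel l cur [] := by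
  induction fuel with
  | zero => intro l cur acc; simp [PySem.Chars.splitOn.go]
  | succ f ih =>
    intro l cur acc
    cases l with
    | nil => simp [PySem.Chars.splitOn.go]
    | cons c rest =>
      rw [PySem.Chars.splitOn.go, PySem.Chars.splitOn.go]
      by_cases hp : sep.isPrefixOf (c :: rest) = true
      · simp only [hp, if_true]
        rw [ih, ih (List.drop sep.length (c :: rest)) [] [cur.reverse]]
        simp
      · simp only [hp, Bool.false_eq_true, if_false]
        rw [ih]

theorem splitOn_go_ne_nil (sep : List Char) (fuel : Nat) : ∀ (l cur : List Char) (acc : List (List Char)),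
    PySem.Chars.splitOn.go sep fuel l cur acc ≠ [] := by
  induction fuel with
  | zero => intro l cur acc; simp [PySem.Chars.splitOn.go]
  | succ f ih =>
    intro l cur acc
    cases l with
    | nil => simp [PySem.Chars.splitOn.go]
    | cons c rest =>
      rw [PySem.Chars.splitOn.go]
      by_cases hp : sep.isPrefixOf (c :: rest) = true
      · simp only [hp, if_true]; exact ih _ _ _
      · simp only [hp, Bool.false_eq_true, if_false]; exact ih _ _ _

theorem splitOn_ne_nil (cs sep : List Char) : PySem.Chars.splitOn cs sep ≠ [] :=
  splitOn_go_ne_nil sep _ cs [] []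

-- splitting a string that starts with the separator yields an empty first piece
theorem splitOn_slash_cons (cs : List Char) :
    PySem.Chars.splitOn ('/' :: cs) ['/'] = [] :: PySem.Chars.splitOn cs ['/'] := by
  show PySem.Chars.splitOn.go ['/'] (('/' :: cs).length + 1) ('/' :: cs) [] [] = _
  rw [PySem.Chars.splitOn.go]
  have hp : (['/'] : List Char).isPrefixOf ('/' :: cs) = true := by simp [List.isPrefixOf]
  simp only [hp, if_true]
  rw [splitOn_go_acc]
  simp only [List.length_cons, List.reverse_nil]
  rfl

theorem slice_one_none {α : Type} (x : α) (xs : List α) :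
    PySem.List.slice (x :: xs) (some 1) none = xs := by
  simp [PySem.List.slice, PySem.List.clampIdx]

theorem slice_one_neg_one {α : Type} (x : α) (xs : List α) :
    PySem.List.slice (x :: xs) (some 1) (some (-1)) = xs.dropLast := by
  simp only [PySem.List.slice, PySem.List.clampIdx]
  norm_num
  split_ifs with h
  · omega
  · rw [List.dropLast_eq_take]

theorem slice_none_neg_one {α : Type} (l : List α) :
    PySem.List.slice l none (some (-1)) = l.dropLast := by
  simp only [PySem.List.slice, PySem.List.clampIdx]
  norm_num
  split_ifs with h
  · have : l = [] := by cases l <;> simp_all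
    simp [this]
  · rw [List.dropLast_eq_take]
    congr 1
    omega

theorem slice_neg_one_none {α : Type} (l : List α) (h : l ≠ []) :
    PySem.List.slice l (some (-1)) none = [l.getLast h] := by
  have hl : 1 ≤ l.length := List.length_pos_iff.mpr h
  simp only [PySem.List.slice, PySem.List.clampIdx]
  norm_num
  split_ifs with h1
  · simp_all
  · have he : ((l.length : Int) + -1).toNat = l.length - 1 := by omega
    rw [he]
    rcases List.eq_nil_or_concat l with rfl | ⟨ys, a, rfl⟩
    · exact absurd rfl h
    · simp [List.concat_eq_append]

theorem pyGet?_neg_one {α : Type} (l : List α) : PySem.List.pyGet? l (-1) = l.getLast? := by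
  simp only [PySem.List.pyGet?, PySem.List.pyIdx?]
  norm_num
  split_ifs with h1
  · rcases List.eq_nil_or_concat l with rfl | ⟨ys, a, rfl⟩
    · simp
    · simp
  · have : l = [] := by cases l <;> simp_all
    simp [this]

theorem pyGet?_cons_one {α : Type} (x y : α) (l : List α) :
    PySem.List.pyGet? (x :: y :: l) 1 = some y := by
  simp [PySem.List.pyGet?, PySem.List.pyIdx?]

-- str.split with a one-character separator, on the List Char side
theorem split_getD (x : String) :
    (PySem.Str.split? x "/").getD [] = (PySem.Chars.splitOn x.toList ['/']).map String.ofList := by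
  have hsep : ("/" : String).toList = ['/'] := by decide
  simp [PySem.Str.split?, PySem.Chars.split?, hsep]

-- ===== VERDICT (by name: the statement is the Claim_ definition above) =====
theorem parse_spec : Claim_equal_parse := by
  intro s hdom hpre
  unfold Spec_parse
  obtain ⟨hne, t0, ht0, hp0⟩ := hpre
  set toks := (PySem.Str.split? s " ").getD [] with htoks
  have hfind : (List.find? (fun t => decide (PySem.Str.pyGet? t 0 = some '/')) toks.reverse).isSome := by
    rw [List.find?_isSome]
    exact ⟨t0, by simp [ht0], by simpa using hp0⟩
  obtain ⟨path, hpath⟩ := Option.isSome_iff_exists.mp hfind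
  have hpathP : PySem.Str.pyGet? path 0 = some '/' := by
    have := List.find?_some hpath
    simpa using this
  obtain ⟨cs, hcs⟩ : ∃ cs, path.toList = '/' :: cs := by
    rcases hlc : path.toList with _ | ⟨a, l⟩
    · simp [PySem.Str.pyGet?, hlc, PySem.List.pyGet?, PySem.List.pyIdx?] at hpathP
    · refine ⟨l, ?_⟩
      simp [PySem.Str.pyGet?, hlc, PySem.List.pyGet?, PySem.List.pyIdx?] at hpathP
      rw [hpathP]
  -- the split lists on both sides
  have hA : (PySem.Str.split? path "/").getD [] =
      "" :: (PySem.Chars.splitOn cs ['/']).map String.ofList := by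
    rw [split_getD, hcs, splitOn_slash_cons]
    simp
  have hsliceTL : (PySem.Str.slice path (some 1) none).toList = cs := by
    rw [PySem.Str.toList_slice, hcs]
    simp [slice_one_none]
  have hB : (PySem.Str.split? (PySem.Str.slice path (some 1) none) "/").getD [] =
      (PySem.Chars.splitOn cs ['/']).map String.ofList := by
    rw [split_getD, hsliceTL]
  obtain ⟨q, qs, hq⟩ : ∃ q qs, PySem.Chars.splitOn cs ['/'] = q :: qs := by
    rcases hsp : PySem.Chars.splitOn cs ['/'] with _ | ⟨q, qs⟩
    · exact absurd hsp (splitOn_ne_nil cs ['/'])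
    · exact ⟨q, qs, rfl⟩
  rw [hq] at hA hB
  -- reduce both programs
  show parse s = parse_alt s
  rw [parse, parse_alt]
  simp only [← htoks]
  rw [foldl_parseStep]
  simp only [Option.or_none]
  rw [hpath]
  unfold pvFindRev
  rw [hpath]
  simp only [hA, hB, List.map_cons]
  rcases qs with _ | ⟨x, xs⟩
  · rw [slice_neg_one_none (h := by simp)]
    simp [slice_one_none, slice_one_neg_one, PySem.List.pyGet?, PySem.List.pyIdx?]
    rfl
  · rw [slice_neg_one_none (h := by simp)]
    simp [pyGet?_cons_one, slice_one_none, slice_one_neg_one,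
          slice_none_neg_one, pyGet?_neg_one, List.getLast?_eq_getElem?, List.getLast_eq_getElem]
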